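-- pv_equiv track=rewrite | github.com/cychen2021/mimid | taints/chains/core/HandleScanf.py | _get_width_and_type
-- ===== SOURCE A (Python) =====
-- from typing import Tuple, List, Union, Dict
--
-- def _get_width_and_type(current_string_position: int, scanf_string: str) -> Tuple[int, str, int]:
--     """
--     Parses width and type out of the scanf_string.
--     :param current_string_position: the current position in the scanf_string (i.e. the first character after the "%"
--     :param scanf_string: the full scanf string
--     :return: Tuple with: (width, type, pos), where width is the parsed width (-1 if no width defined), type is the type that will be parsed and pos is the position after the format specifier in the scanf string
--     """
--     c = scanf_string[current_string_position]
--     if c == "*":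
--         # star means the string is parsed but not stored, we still need to generate a value for the format specifier
--         current_string_position += 1
--         c = scanf_string[current_string_position]
--     width = -1
--     if c.isdigit():
--         width_string = ""
--         while c.isdigit():
--             width_string += c
--             current_string_position += 1
--             c = scanf_string[current_string_position]
--         width = int(width_string)
--
--     if c in "hlL":
--         # the modifier defines the size of the memory the read value will be written to, this is not relevant for us when generating a value
--         current_string_position += 1
--         c = scanf_string[current_string_position]
--
--     tp = ""
--     if c == "[":
--         # in this special case we have a set of chars that are parsed, not a specific modifier
--         escaped = False
--         tp += c
--         current_string_position += 1
--         c = scanf_string[current_string_position]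
--         while c != "]" or escaped:
--             tp += c
--             if c == "\\" and not escaped:
--                 escaped = True
--             elif escaped:
--                 escaped = False
--             current_string_position += 1
--             c = scanf_string[current_string_position]
--         tp += c
--     else:
--         tp = c
--
--     return width, tp, current_string_position
-- ===== SOURCE B (Python) =====
-- def _get_width_and_type(current_string_position: int, scanf_string: str):
--     # Parse on the suffix starting at the given position; compute component
--     # boundaries as indices and take slices, instead of advancing a cursor
--     # char by char with accumulator strings and an escape flag.
--     t = scanf_string[current_string_position:]
--     i = 1 if t[0] == "*" else 0
--     j = i
--     while j < len(t) and t[j].isdigit():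
--         j += 1
--     width = int(t[i:j]) if j > i else -1
--     if t[j] in "hlL":
--         j += 1
--     if t[j] == "[":
--         k = j + 1
--         while t[k] != "]":
--             k += 2 if t[k] == "\\" else 1  # a backslash escapes the next char
--         tp = t[j:k + 1]
--         j = k
--     else:
--         tp = t[j]
--     return width, tp, current_string_position + j
-- ===== Notes on version B (the rewrite author's own statement) =====
-- stated objective: simpler
-- what changed: B slices off the suffix at the given position and computes component boundaries as indices (end of the digit run; the closing bracket found by skipping backslash-escaped pairs in strides of two), deriving width and type from slices, instead of A's cursor that advances char by char while accumulating strings and toggling an escape flag.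
-- outside the precondition, e.g. on _get_width_and_type(-1, 's2'): A returns (2, 's', 0), B raises IndexError; on _get_width_and_type(-2, '5L'): A returns (5, '5', 0), B raises IndexError
import Mathlib
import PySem

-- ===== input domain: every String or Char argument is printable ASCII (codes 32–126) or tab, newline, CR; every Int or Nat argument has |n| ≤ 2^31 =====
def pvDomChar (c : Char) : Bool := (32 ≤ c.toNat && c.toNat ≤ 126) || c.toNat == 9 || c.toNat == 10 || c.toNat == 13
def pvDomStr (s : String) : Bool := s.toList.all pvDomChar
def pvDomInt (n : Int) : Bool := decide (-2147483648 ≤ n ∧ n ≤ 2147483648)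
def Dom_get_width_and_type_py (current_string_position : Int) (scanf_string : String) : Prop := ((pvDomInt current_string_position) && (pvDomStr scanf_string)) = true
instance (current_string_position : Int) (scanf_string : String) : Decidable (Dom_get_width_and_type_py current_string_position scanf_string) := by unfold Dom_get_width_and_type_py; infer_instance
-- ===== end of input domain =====

-- B re-parses the scanf specifier on the suffix slice, computing component boundaries as
-- indices and taking slices, instead of A's char-by-char cursor with accumulator strings
-- and an escape flag (objective: simpler; return-value equivalence only, no mutation).

-- helper needed by the ports' termination proofs (cited in decreasing_by)
theorem pv_pyGet?_some_lt {α : Type} {xs : List α} {i : Int} {c : α}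
    (h : PySem.List.pyGet? xs i = some c) : i < (xs.length : Int) := by
  by_contra hlt
  have hn : PySem.List.pyGet? xs i = none :=
    (PySem.List.pyGet?_eq_none_iff xs i).2 (fun hr => hlt hr.2)
  simp [hn] at h

-- ===== PORT A =====
-- the `while c.isdigit()` loop: accumulates chars, advances the cursor, re-reads
def aDigitLoop (cs : List Char) (pos : Int) (c : Char) (acc : List Char) :
    Option (List Char × Int × Char) :=
  let acc' := acc ++ [c]
  match h : PySem.List.pyGet? cs (pos + 1) with
  | none => none   -- IndexError
  | some c' =>
    if PySem.Chars.isdigit c' then aDigitLoop cs (pos + 1) c' acc'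
    else some (acc', pos + 1, c')
termination_by ((cs.length : Int) + 1 - pos).toNat
decreasing_by have := pv_pyGet?_some_lt h; omega

-- the `while c != "]" or escaped` loop
def aBracketLoop (cs : List Char) (pos : Int) (c : Char) (escaped : Bool) (acc : List Char) :
    Option (List Char × Int) :=
  if c = ']' ∧ escaped = false then some (acc ++ [c], pos)
  else
    let acc' := acc ++ [c]
    let escaped' := if c = '\\' ∧ escaped = false then true
                    else if escaped = true then false else escaped
    match h : PySem.List.pyGet? cs (pos + 1) with
    | none => none   -- IndexError
    | some c' => aBracketLoop cs (pos + 1) c' escaped' acc'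
termination_by ((cs.length : Int) + 1 - pos).toNat
decreasing_by have := pv_pyGet?_some_lt h; omega

def get_width_and_type_py (current_string_position : Int) (scanf_string : String) :
    Int × String × Int :=
  let cs := scanf_string.toList
  let r : Option (Int × String × Int) :=
    match PySem.List.pyGet? cs current_string_position with
    | none => none
    | some c0 =>
      let step1 : Option (Int × Char) :=
        if c0 = '*' then
          match PySem.List.pyGet? cs (current_string_position + 1) with
          | none => none
          | some c1 => some (current_string_position + 1, c1)
        else some (current_string_position, c0)
      match step1 with
      | none => none
      | some (pos1, c1) =>
        let wstep : Option (Int × Int × Char) :=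
          if PySem.Chars.isdigit c1 then
            match aDigitLoop cs pos1 c1 [] with
            | none => none
            | some (ws, pos2, c2) =>
              match PySem.Int.ofChars? ws with   -- int(width_string)
              | none => none
              | some w => some (w, pos2, c2)
          else some (-1, pos1, c1)
        match wstep with
        | none => none
        | some (width, pos2, c2) =>
          let step3 : Option (Int × Char) :=
            if c2 = 'h' ∨ c2 = 'l' ∨ c2 = 'L' then
              match PySem.List.pyGet? cs (pos2 + 1) with
              | none => none
              | some c3 => some (pos2 + 1, c3)
            else some (pos2, c2)
          match step3 with
          | none => none
          | some (pos3, c3) =>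
            if c3 = '[' then
              match PySem.List.pyGet? cs (pos3 + 1) with
              | none => none
              | some c4 =>
                match aBracketLoop cs (pos3 + 1) c4 false ['['] with
                | none => none
                | some (tp, pos4) => some (width, String.ofList tp, pos4)
            else some (width, String.ofList [c3], pos3)
  r.getD (0, "", 0)

-- ===== PORT B =====
-- end of the digit run beginning at j (the bounded `while j < len(t) and t[j].isdigit()`)
def bDigitEnd (t : List Char) (j : Nat) : Nat :=
  if h : j < t.length then
    if PySem.Chars.isdigit t[j] then bDigitEnd t (j + 1) else j
  else j
termination_by t.length - j

-- index of the closing ']', skipping a backslash and its escaped char in one stride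
def bFindClose (t : List Char) (k : Nat) : Option Nat :=
  if h : k < t.length then
    if t[k] = ']' then some k
    else bFindClose t (k + (if t[k] = '\\' then 2 else 1))
  else none   -- IndexError
termination_by t.length - k
decreasing_by split <;> omega

def get_width_and_type_py_alt (current_string_position : Int) (scanf_string : String) :
    Int × String × Int :=
  let t := PySem.List.slice scanf_string.toList (some current_string_position) none
  let r : Option (Int × String × Int) :=
    match PySem.List.pyGet? t 0 with
    | none => none
    | some c0 =>
      let i : Nat := if c0 = '*' then 1 else 0
      let j : Nat := bDigitEnd t i
      let wopt : Option Int :=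
        if i < j then
          PySem.Int.ofChars? (PySem.List.slice t (some (i : Int)) (some (j : Int)))
        else some (-1)
      match wopt with
      | none => none
      | some width =>
        match PySem.List.pyGet? t (j : Int) with
        | none => none
        | some cj =>
          let j2 : Nat := if cj = 'h' ∨ cj = 'l' ∨ cj = 'L' then j + 1 else j
          match PySem.List.pyGet? t (j2 : Int) with
          | none => none
          | some c2 =>
            if c2 = '[' then
              match bFindClose t (j2 + 1) with
              | none => none
              | some k =>
                some (width,
                      String.ofList (PySem.List.slice t (some (j2 : Int)) (some ((k : Int) + 1))),
                      current_string_position + (k : Int))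
            else some (width, String.ofList [c2], current_string_position + (j2 : Int))
  r.getD (0, "", 0)

-- ===== PRECONDITION & SPEC =====
-- grammar of a complete bracket class body: some char closes it, a backslash protecting its successor
def pvCloses : List Char → Bool
  | [] => false
  | c :: rest =>
    if c = ']' then true
    else if c = '\\' then
      match rest with
      | [] => false
      | _ :: rest' => pvCloses rest'
    else pvCloses rest

-- grammar of a complete format specifier: [*] digits* [hlL] (bracket class | one char)
def pvWF (u : List Char) : Bool :=
  match u with
  | [] => false
  | c :: _ =>
    let u1 := if c = '*' then u.tail else u
    let u2 := u1.dropWhile PySem.Chars.isdigit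
    match u2 with
    | [] => false
    | c2 :: _ =>
      let u3 := if c2 = 'h' ∨ c2 = 'l' ∨ c2 = 'L' then u2.tail else u2
      match u3 with
      | [] => false
      | c3 :: rest3 => if c3 = '[' then pvCloses rest3 else true

-- Pre_ excludes the inputs on which A raises IndexError (start position below -len(s), or a
-- truncated specifier) and the negative start positions whose scan would wrap past the end of
-- the string back onto its front — an accident of Python's negative indexing on which B's
-- suffix-based parse raises IndexError instead of returning A's wrapped-around value.
def Pre_get_width_and_type_py (current_string_position : Int) (scanf_string : String) : Prop :=
  -(scanf_string.toList.length : Int) ≤ current_string_position ∧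
  pvWF (PySem.List.slice scanf_string.toList (some current_string_position) none) = true
instance (current_string_position : Int) (scanf_string : String) : Decidable (Pre_get_width_and_type_py current_string_position scanf_string) := by unfold Pre_get_width_and_type_py; infer_instance

def pvWitness_get_width_and_type_py : Int × String := (0, "10ld")

def Spec_get_width_and_type_py (current_string_position : Int) (scanf_string : String) (out : Int × String × Int) : Prop := out = get_width_and_type_py_alt current_string_position scanf_string
instance (current_string_position : Int) (scanf_string : String) (out : Int × String × Int) : Decidable (Spec_get_width_and_type_py current_string_position scanf_string out) := by unfold Spec_get_width_and_type_py; infer_instance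

-- ===== CLAIM (what is proved, stated in full; the proofs are below) =====
def Claim_equal_get_width_and_type_py : Prop := ∀ (current_string_position : Int) (scanf_string : String), Dom_get_width_and_type_py current_string_position scanf_string → Pre_get_width_and_type_py current_string_position scanf_string → Spec_get_width_and_type_py current_string_position scanf_string (get_width_and_type_py current_string_position scanf_string)

-- ===== LEMMAS AND PROOFS =====
theorem pv_read (cs : List Char) (p : Int) (u : List Char)
    (hu : u = PySem.List.slice cs (some p) none)
    (hp : -(cs.length : Int) ≤ p) (j : Nat) (hj : j < u.length) :
    PySem.List.pyGet? cs (p + (j : Int)) = u[j]? := by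
  subst hu
  rw [PySem.List.slice_some_none] at hj ⊢
  have hlen : (List.drop (PySem.List.clampIdx cs.length p) cs).length
      = cs.length - PySem.List.clampIdx cs.length p := by simp
  by_cases hpos : 0 ≤ p
  · have hle : p.toNat ≤ cs.length := by
      by_contra hgt
      have hc : PySem.List.clampIdx cs.length p = cs.length := by
        simp only [PySem.List.clampIdx, if_neg (by omega : ¬ p < 0)]
        omega
      rw [hc] at hj
      simp at hj
    have hd : PySem.List.clampIdx cs.length p = p.toNat := by
      simp only [PySem.List.clampIdx, if_neg (by omega : ¬ p < 0)]
      omega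
    rw [PySem.List.pyGet?_of_nonneg cs (by omega : (0:Int) ≤ p + (j:Int))]
    rw [List.getElem?_drop, hd]
    congr 1
    omega
  · have hneg : p < 0 := by omega
    have hd : PySem.List.clampIdx cs.length p = (cs.length + p).toNat := by
      simp only [PySem.List.clampIdx, if_pos hneg, if_neg (by omega : ¬ (cs.length : Int) + p < 0)]
    have hjlt : (j : Int) < -p := by
      rw [hlen, hd] at hj
      omega
    have hk : p + (j : Int) = -(((-(p + j)).toNat : Nat) : Int) := by omega
    rw [hk, PySem.List.pyGet?_neg_natCast cs _ (by omega) (by omega)]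
    rw [List.getElem?_drop, hd]
    congr 1
    omega
theorem bde_le (t : List Char) : ∀ n j, t.length - j ≤ n → j ≤ bDigitEnd t j := by
  intro n
  induction n with
  | zero =>
    intro j h
    unfold bDigitEnd
    split
    · exact absurd ‹j < t.length› (by omega)
    · exact le_rfl
  | succ n ih =>
    intro j h
    unfold bDigitEnd
    split
    · split
      · exact le_trans (by omega) (ih (j + 1) (by omega))
      · exact le_rfl
    · exact le_rfl

theorem bde_ge (t : List Char) (j : Nat) (h : t.length ≤ j) : bDigitEnd t j = j := by
  unfold bDigitEnd
  rw [dif_neg (by omega)]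

theorem bde_dropWhile (t : List Char) : ∀ n j, t.length - j ≤ n →
    (t.drop j).dropWhile PySem.Chars.isdigit = t.drop (bDigitEnd t j) := by
  intro n
  induction n with
  | zero =>
    intro j h
    have hj : t.length ≤ j := by omega
    rw [bde_ge t j hj, List.drop_eq_nil_of_le hj]
    simp
  | succ n ih =>
    intro j h
    unfold bDigitEnd
    split
    · rename_i hj
      rw [← List.getElem_cons_drop hj, List.dropWhile_cons]
      split
      · exact ih (j + 1) (by omega)
      · exact List.getElem_cons_drop hj
    · rename_i hj
      rw [List.drop_eq_nil_of_le (by omega)]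
      simp
theorem aDigit_eq (cs : List Char) (p : Int) (u : List Char)
    (hu : u = PySem.List.slice cs (some p) none) (hp : -(cs.length : Int) ≤ p) :
    ∀ n j acc (hj : j < u.length), u.length - j ≤ n →
      PySem.Chars.isdigit (u[j]'hj) = true →
      ∀ (he : bDigitEnd u j < u.length),
      aDigitLoop cs (p + (j : Int)) (u[j]'hj) acc =
        some (acc ++ (u.drop j).take (bDigitEnd u j - j), p + ((bDigitEnd u j : Nat) : Int),
              u[bDigitEnd u j]'he) := by
  intro n
  induction n with
  | zero =>
    intro j acc hj h hd he
    exact absurd hj (by omega)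
  | succ n ih =>
    intro j acc hj h hd he
    have hbde : bDigitEnd u j = bDigitEnd u (j + 1) := by
      conv_lhs => unfold bDigitEnd
      rw [dif_pos hj, if_pos hd]
    have hj1 : j + 1 < u.length := by
      by_contra hc
      have h2 := bde_ge u (j + 1) (by omega)
      omega
    have hjle : j + 1 ≤ bDigitEnd u (j + 1) := bde_le u (u.length - (j+1)) (j+1) le_rfl
    have hread : PySem.List.pyGet? cs (p + (j : Int) + 1) = some (u[j+1]'hj1) := by
      rw [show p + (j:Int) + 1 = p + (((j+1 : Nat)) : Int) by push_cast; ring]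
      rw [pv_read cs p u hu hp (j+1) hj1, List.getElem?_eq_getElem hj1]
    unfold aDigitLoop
    split
    · rename_i heq
      rw [hread] at heq
      cases heq
    rename_i c' heq
    rw [hread] at heq
    injection heq with heq
    subst heq
    by_cases hd2 : PySem.Chars.isdigit (u[j+1]'hj1) = true
    · rw [if_pos hd2]
      have hrec := ih (j+1) (acc ++ [u[j]'hj]) hj1 (by omega) hd2 (hbde ▸ he)
      rw [show p + (j:Int) + 1 = p + (((j+1 : Nat)) : Int) by push_cast; ring, hrec]
      simp only [hbde]
      congr 1
      rw [List.append_assoc]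
      congr 1
      rw [← List.getElem_cons_drop hj,
          show bDigitEnd u (j+1) - j = (bDigitEnd u (j+1) - (j+1)) + 1 by omega,
          List.take_succ_cons]
      simp
    · rw [if_neg hd2]
      have hend : bDigitEnd u (j + 1) = j + 1 := by
        conv_lhs => unfold bDigitEnd
        rw [dif_pos hj1, if_neg hd2]
      simp only [hbde, hend]
      rw [show (j+1) - j = 1 by omega, ← List.getElem_cons_drop hj, List.take_succ_cons,
          List.take_zero, show p + (j:Int) + 1 = p + (((j+1:Nat)) : Int) by push_cast; ring]
theorem pvCloses_ne_nil {xs : List Char} (h : pvCloses xs = true) : xs ≠ [] := by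
  intro hn
  rw [hn] at h
  simp [pvCloses] at h

theorem aBracketLoop_step (cs : List Char) (pos : Int) (c c' : Char) (acc : List Char)
    (h1 : c ≠ ']') (h : PySem.List.pyGet? cs (pos + 1) = some c') :
    aBracketLoop cs pos c false acc =
      aBracketLoop cs (pos + 1) c' (if c = '\\' then true else false) (acc ++ [c]) := by
  conv_lhs => unfold aBracketLoop
  rw [if_neg (by simp [h1])]
  by_cases h2 : c = '\\'
  · rw [if_pos (⟨h2, rfl⟩ : c = '\\' ∧ false = false), if_pos h2]
    split
    · rename_i heq
      rw [h] at heq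
      cases heq
    · rename_i c'' heq
      rw [h] at heq
      injection heq with heq
      subst heq
      rfl
  · rw [if_neg (by simp [h2]), if_neg h2, if_neg (show ¬(false = true) by decide)]
    split
    · rename_i heq
      rw [h] at heq
      cases heq
    · rename_i c'' heq
      rw [h] at heq
      injection heq with heq
      subst heq
      rfl

theorem aBracketLoop_esc_step (cs : List Char) (pos : Int) (c c' : Char) (acc : List Char)
    (h : PySem.List.pyGet? cs (pos + 1) = some c') :
    aBracketLoop cs pos c true acc = aBracketLoop cs (pos + 1) c' false (acc ++ [c]) := by
  conv_lhs => unfold aBracketLoop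
  rw [if_neg (by simp), if_neg (by simp : ¬(c = '\\' ∧ true = false)), if_pos rfl]
  split
  · rename_i heq
    rw [h] at heq
    cases heq
  · rename_i c'' heq
    rw [h] at heq
    injection heq with heq
    subst heq
    rfl

theorem aBracket_eq (cs : List Char) (p : Int) (u : List Char)
    (hu : u = PySem.List.slice cs (some p) none) (hp : -(cs.length : Int) ≤ p) :
    ∀ n j acc (hj : j < u.length), u.length - j ≤ n → pvCloses (u.drop j) = true →
      ∃ (k : Nat), k < u.length ∧ j ≤ k ∧ bFindClose u j = some k ∧
        aBracketLoop cs (p + (j : Int)) (u[j]'hj) false acc =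
          some (acc ++ (u.drop j).take (k + 1 - j), p + (k : Int)) := by
  intro n
  induction n with
  | zero =>
    intro j acc hj h hc
    exact absurd hj (by omega)
  | succ n ih =>
    intro j acc hj h hc
    have hdrop : u.drop j = (u[j]'hj) :: u.drop (j + 1) := (List.getElem_cons_drop hj).symm
    by_cases h1 : (u[j]'hj) = ']'
    · refine ⟨j, hj, le_rfl, ?_, ?_⟩
      · unfold bFindClose
        rw [dif_pos hj, if_pos h1]
      · conv_lhs => unfold aBracketLoop
        rw [if_pos ⟨h1, rfl⟩, hdrop, show j + 1 - j = 1 by omega, List.take_succ_cons,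
            List.take_zero]
    · rw [hdrop] at hc
      unfold pvCloses at hc
      rw [if_neg h1] at hc
      by_cases h2 : (u[j]'hj) = '\\'
      · rw [if_pos h2] at hc
        rcases hdj : u.drop (j + 1) with _ | ⟨c2, rest2⟩
        · rw [hdj] at hc
          exact Bool.noConfusion hc
        · rw [hdj] at hc
          have hj1 : j + 1 < u.length := by
            have hlen := congrArg List.length hdj
            simp at hlen
            omega
          have hdj' : u.drop (j + 1) = (u[j+1]'hj1) :: u.drop (j + 2) :=
            (List.getElem_cons_drop hj1).symm
          rw [hdj] at hdj'
          injection hdj'.symm with he1 he2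
          subst he1
          rw [← he2] at hc
          have hj2 : j + 2 < u.length := by
            have hne := pvCloses_ne_nil hc
            rw [ne_eq, List.drop_eq_nil_iff] at hne
            omega
          have hread1 : PySem.List.pyGet? cs (p + (j : Int) + 1) = some (u[j+1]'hj1) := by
            rw [show p + (j:Int) + 1 = p + (((j+1:Nat)):Int) by push_cast; ring,
                pv_read cs p u hu hp (j+1) hj1, List.getElem?_eq_getElem hj1]
          have hread2 : PySem.List.pyGet? cs (p + (((j+1:Nat)):Int) + 1) = some (u[j+2]'hj2) := by
            rw [show p + (((j+1:Nat)):Int) + 1 = p + (((j+2:Nat)):Int) by push_cast; ring,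
                pv_read cs p u hu hp (j+2) hj2, List.getElem?_eq_getElem hj2]
          obtain ⟨k, hk, hkge, hfind, hloop⟩ :=
            ih (j + 2) (acc ++ [u[j]'hj] ++ [u[j+1]'hj1]) hj2 (by omega) hc
          refine ⟨k, hk, by omega, ?_, ?_⟩
          · conv_lhs => unfold bFindClose
            rw [dif_pos hj, if_neg h1, if_pos h2]
            exact hfind
          · rw [aBracketLoop_step cs (p + (j:Int)) _ (u[j+1]'hj1) acc h1 hread1, if_pos h2,
                show p + (j:Int) + 1 = p + (((j+1:Nat)):Int) by push_cast; ring,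
                aBracketLoop_esc_step cs _ _ (u[j+2]'hj2) _ hread2,
                show p + (((j+1:Nat)):Int) + 1 = p + (((j+2:Nat)):Int) by push_cast; ring,
                hloop]
            congr 1
            rw [hdrop, hdj, ← he2, show k + 1 - j = (k + 1 - (j + 2)) + 1 + 1 by omega,
                List.take_succ_cons, List.take_succ_cons]
            simp [List.append_assoc]
      · rw [if_neg h2] at hc
        have hj1 : j + 1 < u.length := by
          have hne := pvCloses_ne_nil hc
          rw [ne_eq, List.drop_eq_nil_iff] at hne
          omega
        have hread1 : PySem.List.pyGet? cs (p + (j : Int) + 1) = some (u[j+1]'hj1) := by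
          rw [show p + (j:Int) + 1 = p + (((j+1:Nat)):Int) by push_cast; ring,
              pv_read cs p u hu hp (j+1) hj1, List.getElem?_eq_getElem hj1]
        obtain ⟨k, hk, hkge, hfind, hloop⟩ := ih (j + 1) (acc ++ [u[j]'hj]) hj1 (by omega) hc
        refine ⟨k, hk, by omega, ?_, ?_⟩
        · conv_lhs => unfold bFindClose
          rw [dif_pos hj, if_neg h1, if_neg h2]
          exact hfind
        · rw [aBracketLoop_step cs (p + (j:Int)) _ (u[j+1]'hj1) acc h1 hread1, if_neg h2,
              show p + (j:Int) + 1 = p + (((j+1:Nat)):Int) by push_cast; ring, hloop]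
          congr 1
          rw [List.append_assoc]
          congr 1
          rw [hdrop, show k + 1 - j = (k + 1 - (j + 1)) + 1 by omega, List.take_succ_cons]
          simp

-- ===== VERDICT (by name: the statement is the Claim_ definition above) =====
theorem get_width_and_type_py_spec : Claim_equal_get_width_and_type_py := by
  intro p s _hdom hpre
  unfold Spec_get_width_and_type_py
  obtain ⟨hp, hwf⟩ := hpre
  unfold get_width_and_type_py get_width_and_type_py_alt
  set cs := s.toList with hcs
  set u := PySem.List.slice s.toList (some p) none with hu
  have hune : u ≠ [] := by
    intro hn
    rw [hn] at hwf
    exact Bool.noConfusion hwf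
  have h0 : 0 < u.length := List.length_pos_of_ne_nil hune
  obtain ⟨c0, t0, hu0⟩ := List.exists_cons_of_ne_nil hune
  have hr0 : PySem.List.pyGet? cs p = some c0 := by
    have h := pv_read cs p u hu hp 0 h0
    rw [show p + ((0:Nat):Int) = p by simp] at h
    rw [h, hu0]
    rfl
  have hb0 : PySem.List.pyGet? u 0 = some c0 := by
    rw [PySem.List.pyGet?_zero, hu0]
    rfl
  rw [hu0] at hwf
  unfold pvWF at hwf
  set i : Nat := if c0 = '*' then 1 else 0 with hi
  have hu1 : (if c0 = '*' then (c0 :: t0).tail else c0 :: t0) = u.drop i := by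
    by_cases hs : c0 = '*'
    · simp [hs, hi, hu0]
    · simp [hs, hi, hu0]
  replace hwf :
      (match List.dropWhile PySem.Chars.isdigit (if c0 = '*' then (c0 :: t0).tail else c0 :: t0) with
        | [] => false
        | c2 :: _ =>
          match (if c2 = 'h' ∨ c2 = 'l' ∨ c2 = 'L' then
              (List.dropWhile PySem.Chars.isdigit (if c0 = '*' then (c0 :: t0).tail else c0 :: t0)).tail
            else List.dropWhile PySem.Chars.isdigit (if c0 = '*' then (c0 :: t0).tail else c0 :: t0)) with
          | [] => false
          | c3 :: rest3 => if c3 = '[' then pvCloses rest3 else true) = true := hwf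
  rw [hu1, bde_dropWhile u u.length i (by omega)] at hwf
  set e : Nat := bDigitEnd u i with he
  rcases h2 : u.drop e with _ | ⟨c2, t2⟩
  · rw [h2] at hwf
    exact Bool.noConfusion hwf
  have helt : e < u.length := by
    have hlen := congrArg List.length h2
    simp at hlen
    omega
  have hdropE : u.drop e = (u[e]'helt) :: u.drop (e + 1) := (List.getElem_cons_drop helt).symm
  rw [h2] at hdropE
  injection hdropE with hc2 ht2
  subst hc2
  subst ht2
  rw [h2] at hwf
  replace hwf :
      (match (if (u[e]'helt) = 'h' ∨ (u[e]'helt) = 'l' ∨ (u[e]'helt) = 'L' then u.drop (e + 1)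
          else (u[e]'helt) :: u.drop (e + 1)) with
        | [] => false
        | c3 :: rest3 => if c3 = '[' then pvCloses rest3 else true) = true := hwf
  set j2 : Nat := if (u[e]'helt) = 'h' ∨ (u[e]'helt) = 'l' ∨ (u[e]'helt) = 'L' then e + 1 else e with hj2
  have hu3 : (if (u[e]'helt) = 'h' ∨ (u[e]'helt) = 'l' ∨ (u[e]'helt) = 'L' then u.drop (e + 1)
      else (u[e]'helt) :: u.drop (e + 1)) = u.drop j2 := by
    by_cases hm : (u[e]'helt) = 'h' ∨ (u[e]'helt) = 'l' ∨ (u[e]'helt) = 'L'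
    · rw [if_pos hm, hj2, if_pos hm]
    · rw [if_neg hm, hj2, if_neg hm, ← h2]
  rw [hu3] at hwf
  rcases h3 : u.drop j2 with _ | ⟨c3, t3⟩
  · rw [h3] at hwf
    exact Bool.noConfusion hwf
  have hj2lt : j2 < u.length := by
    have hlen := congrArg List.length h3
    simp at hlen
    omega
  have hdropJ : u.drop j2 = (u[j2]'hj2lt) :: u.drop (j2 + 1) := (List.getElem_cons_drop hj2lt).symm
  rw [h3] at hdropJ
  injection hdropJ with hc3 ht3
  subst hc3
  subst ht3
  rw [h3] at hwf
  replace hwf : (if (u[j2]'hj2lt) = '[' then pvCloses (u.drop (j2 + 1)) else true) = true := hwf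
  -- i is within range
  have hile : i ≤ e := he ▸ bde_le u u.length i (by omega)
  have hi_lt : i < u.length := by omega
  -- phase 1: the optional star
  have hstep1 : (if c0 = '*' then
        match PySem.List.pyGet? cs (p + 1) with
        | none => none
        | some c1 => some (p + 1, c1)
      else some (p, c0)) = some (p + (i : Int), u[i]'hi_lt) := by
    by_cases hs : c0 = '*'
    · have hival : i = 1 := by rw [hi, if_pos hs]
      rw [if_pos hs,
          show (p : Int) + 1 = p + ((1 : Nat) : Int) by push_cast; ring,
          pv_read cs p u hu hp 1 (hival ▸ hi_lt), List.getElem?_eq_getElem (hival ▸ hi_lt)]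
      simp [hival]
    · have hival : i = 0 := by rw [hi, if_neg hs]
      rw [if_neg hs]
      have : u[i]'hi_lt = c0 := by
        simp [hival, hu0]
      rw [this]
      simp [hival]
  -- phase 2: the width
  have hAW : (if PySem.Chars.isdigit (u[i]'hi_lt) = true then
        match aDigitLoop cs (p + (i : Int)) (u[i]'hi_lt) [] with
        | none => none
        | some (ws, pos2, c2) =>
          match PySem.Int.ofChars? ws with
          | none => none
          | some w => some (w, pos2, c2)
      else some (-1, p + (i : Int), u[i]'hi_lt)) =
      (match (if i < e then PySem.Int.ofChars? (List.take (e - i) (List.drop i u)) else some (-1)) with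
      | none => none
      | some w => some (w, p + (e : Int), u[e]'helt)) := by
    by_cases hd : PySem.Chars.isdigit (u[i]'hi_lt) = true
    · have hilt_e : i < e := by
        have h1 : bDigitEnd u i = bDigitEnd u (i + 1) := by
          conv_lhs => unfold bDigitEnd
          rw [dif_pos hi_lt, if_pos hd]
        have h2' := bde_le u u.length (i + 1) (by omega)
        omega
      have hdig := aDigit_eq cs p u hu hp u.length i [] hi_lt (by omega) hd (he ▸ helt)
      rw [if_pos hd, hdig, if_pos hilt_e]
      simp only [List.nil_append, ← he]
    · have heei : e = i := by
        rw [he]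
        unfold bDigitEnd
        rw [dif_pos hi_lt, if_neg hd]
      rw [if_neg hd, if_neg (by omega : ¬ i < e)]
      simp [heei]
  -- B-side reads
  have hbe : PySem.List.pyGet? u ((e : Nat) : Int) = some (u[e]'helt) := by
    rw [PySem.List.pyGet?_natCast, List.getElem?_eq_getElem helt]
  have hbj2 : PySem.List.pyGet? u ((j2 : Nat) : Int) = some (u[j2]'hj2lt) := by
    rw [PySem.List.pyGet?_natCast, List.getElem?_eq_getElem hj2lt]
  -- evaluate both programs
  simp only [hr0, hb0, ← hi, ← he, hstep1, hAW, PySem.List.slice_natCast, hbe]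
  rcases howc : (if i < e then PySem.Int.ofChars? (List.take (e - i) (List.drop i u)) else some (-1))
      with _ | w
  · rfl
  simp only [← hj2]
  -- phase 3: the modifier
  have hstep3 : (if (u[e]'helt) = 'h' ∨ (u[e]'helt) = 'l' ∨ (u[e]'helt) = 'L' then
        match PySem.List.pyGet? cs (p + (e : Int) + 1) with
        | none => none
        | some c3 => some (p + (e : Int) + 1, c3)
      else some (p + (e : Int), u[e]'helt)) = some (p + (j2 : Int), u[j2]'hj2lt) := by
    by_cases hm : (u[e]'helt) = 'h' ∨ (u[e]'helt) = 'l' ∨ (u[e]'helt) = 'L'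
    · have hj2val : j2 = e + 1 := by rw [hj2, if_pos hm]
      rw [if_pos hm,
          show p + ((e : Nat) : Int) + 1 = p + (((e + 1 : Nat)) : Int) by push_cast; ring,
          pv_read cs p u hu hp (e + 1) (hj2val ▸ hj2lt), List.getElem?_eq_getElem (hj2val ▸ hj2lt)]
      simp [hj2val]
    · have hj2val : j2 = e := by rw [hj2, if_neg hm]
      rw [if_neg hm]
      simp [hj2val]
  simp only [hstep3, hbj2]
  -- phase 4: the type
  by_cases hbk : (u[j2]'hj2lt) = '['
  · rw [if_pos hbk] at hwf
    have hj21lt : j2 + 1 < u.length := by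
      have hne := pvCloses_ne_nil hwf
      rw [ne_eq, List.drop_eq_nil_iff] at hne
      omega
    have hrb : PySem.List.pyGet? cs (p + (j2 : Int) + 1) = some (u[j2+1]'hj21lt) := by
      rw [show p + ((j2 : Nat) : Int) + 1 = p + (((j2 + 1 : Nat)) : Int) by push_cast; ring,
          pv_read cs p u hu hp (j2 + 1) hj21lt, List.getElem?_eq_getElem hj21lt]
    obtain ⟨k, hk, hkge, hfind, hloop⟩ :=
      aBracket_eq cs p u hu hp u.length (j2 + 1) ['['] hj21lt (by omega) hwf
    rw [show p + (((j2 + 1 : Nat)) : Int) = p + ((j2 : Nat) : Int) + 1 by push_cast; ring] at hloop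
    simp only [if_pos hbk, hrb, hloop, hfind]
    have htp : PySem.List.slice u (some ((j2 : Nat) : Int)) (some (((k : Nat) : Int) + 1)) =
        '[' :: List.take (k + 1 - (j2 + 1)) (List.drop (j2 + 1) u) := by
      rw [show (((k : Nat) : Int) + 1) = (((k + 1 : Nat)) : Int) by push_cast; ring,
          PySem.List.slice_natCast, ← List.getElem_cons_drop hj2lt, hbk,
          show k + 1 - j2 = (k + 1 - (j2 + 1)) + 1 by omega, List.take_succ_cons]
    rw [htp]
    rfl
  · simp only [if_neg hbk]
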